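-- pv_equiv track=rewrite | github.com/helenaolafsdottir/MasterThesisWeb | HierarchyClassifiers/classifier_level2_requirements.py | categorySplitLevel1
-- ===== SOURCE A (Python) =====
-- def categorySplitLevel1(trueLabel, predLabel):
--     """
--     Separates true and predicted labels for level 1 categories, based on true value.
--     This is done so it's possible to calculate the prediciton accuracy of each category
--     Inputs: trueLabel (List) - a list of true labels
--             predLabel (List) - a list of predictions
--     Returns: Lists of true labels and predicted labels for each of the level 1 categories
--     """
--
--     requirementTrue = []
--     requirementPred = []
--     systemTrue = []
--     systemPred = []
--     domainTrue = []
--     domainPred = []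
--     devProcessTrue = []
--     devProcessPred = []
--     docOrgTrue = []
--     docOrgPred = []
--     uncertainTrue = []
--     uncertainPred = []
--     nonInformationTrue = []
--     nonInformationPred = []
--
--     for i, cat in enumerate(trueLabel):
--         if cat == 'requirement':
--             requirementTrue.append(trueLabel[i])
--             requirementPred.append(predLabel[i])
--         elif cat == 'system':
--             systemTrue.append(trueLabel[i])
--             systemPred.append(predLabel[i])
--         elif cat == 'domain':
--             domainTrue.append(trueLabel[i])
--             domainPred.append(predLabel[i])
--         elif cat == 'development process':
--             devProcessTrue.append(trueLabel[i])
--             devProcessPred.append(predLabel[i])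
--         elif cat == 'document organisation':
--             docOrgTrue.append(trueLabel[i])
--             docOrgPred.append(predLabel[i])
--         elif cat == 'uncertain':
--             uncertainTrue.append(trueLabel[i])
--             uncertainPred.append(predLabel[i])
--         elif cat == 'non-information':
--             nonInformationTrue.append(trueLabel[i])
--             nonInformationPred.append(predLabel[i])
--
--     return requirementTrue, requirementPred, systemTrue, systemPred, domainTrue, domainPred, devProcessTrue, devProcessPred, docOrgTrue, docOrgPred, uncertainTrue, uncertainPred, nonInformationTrue, nonInformationPred
-- ===== SOURCE B (Python) =====
-- CATEGORIES = ('requirement', 'system', 'domain', 'development process',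
--               'document organisation', 'uncertain', 'non-information')
--
--
-- def _bucket(pairs, cat):
--     return ([t for t, _ in pairs if t == cat],
--             [p for t, p in pairs if t == cat])
--
--
-- def categorySplitLevel1(trueLabel, predLabel):
--     pairs = list(zip(trueLabel, predLabel))
--     req = _bucket(pairs, 'requirement')
--     sys = _bucket(pairs, 'system')
--     dom = _bucket(pairs, 'domain')
--     dev = _bucket(pairs, 'development process')
--     doc = _bucket(pairs, 'document organisation')
--     unc = _bucket(pairs, 'uncertain')
--     non = _bucket(pairs, 'non-information')
--     return (req[0], req[1], sys[0], sys[1], dom[0], dom[1], dev[0], dev[1],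
--             doc[0], doc[1], unc[0], unc[1], non[0], non[1])
-- ===== Notes on version B (the rewrite author's own statement) =====
-- stated objective: idiomatic
-- what changed: Replaces the single-pass if-elif cascade over 14 mutable accumulator lists with a zip of the two label lists followed by one filter comprehension pass per category bucket.
import Mathlib
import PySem

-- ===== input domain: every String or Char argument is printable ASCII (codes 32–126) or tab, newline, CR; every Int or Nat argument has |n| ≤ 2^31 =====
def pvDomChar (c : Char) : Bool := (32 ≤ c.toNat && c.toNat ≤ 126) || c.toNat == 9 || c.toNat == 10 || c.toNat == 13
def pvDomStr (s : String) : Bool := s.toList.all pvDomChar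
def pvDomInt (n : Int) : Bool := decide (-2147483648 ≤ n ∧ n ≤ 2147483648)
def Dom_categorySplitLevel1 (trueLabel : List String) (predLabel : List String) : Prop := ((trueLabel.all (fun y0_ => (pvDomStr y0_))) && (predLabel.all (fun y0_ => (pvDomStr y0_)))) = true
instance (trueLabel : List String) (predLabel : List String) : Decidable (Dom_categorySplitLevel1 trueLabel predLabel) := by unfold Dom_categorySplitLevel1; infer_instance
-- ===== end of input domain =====

-- B replaces A's if-elif cascade over 14 mutable accumulators with a zip of the two lists
-- and one filter comprehension per category bucket (objective: idiomatic; no speed claim).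

-- ===== PORT A =====
-- the 14 accumulator lists of A's loop
structure StA where
  rT : List String
  rP : List String
  sT : List String
  sP : List String
  dT : List String
  dP : List String
  vT : List String
  vP : List String
  oT : List String
  oP : List String
  uT : List String
  uP : List String
  nT : List String
  nP : List String
deriving Repr, DecidableEq

-- one iteration of A's loop; predLabel[i] raises IndexError when out of range
-- (pyGet? = none there); under Pre_ every such lookup is in range, so getD "" is never taken.
def stepA (trueLabel predLabel : List String) (s : StA) (ic : Int × String) : StA :=
  if ic.2 == "requirement" then
    { s with rT := s.rT ++ [(PySem.List.pyGet? trueLabel ic.1).getD ""],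
             rP := s.rP ++ [(PySem.List.pyGet? predLabel ic.1).getD ""] }
  else if ic.2 == "system" then
    { s with sT := s.sT ++ [(PySem.List.pyGet? trueLabel ic.1).getD ""],
             sP := s.sP ++ [(PySem.List.pyGet? predLabel ic.1).getD ""] }
  else if ic.2 == "domain" then
    { s with dT := s.dT ++ [(PySem.List.pyGet? trueLabel ic.1).getD ""],
             dP := s.dP ++ [(PySem.List.pyGet? predLabel ic.1).getD ""] }
  else if ic.2 == "development process" then
    { s with vT := s.vT ++ [(PySem.List.pyGet? trueLabel ic.1).getD ""],
             vP := s.vP ++ [(PySem.List.pyGet? predLabel ic.1).getD ""] }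
  else if ic.2 == "document organisation" then
    { s with oT := s.oT ++ [(PySem.List.pyGet? trueLabel ic.1).getD ""],
             oP := s.oP ++ [(PySem.List.pyGet? predLabel ic.1).getD ""] }
  else if ic.2 == "uncertain" then
    { s with uT := s.uT ++ [(PySem.List.pyGet? trueLabel ic.1).getD ""],
             uP := s.uP ++ [(PySem.List.pyGet? predLabel ic.1).getD ""] }
  else if ic.2 == "non-information" then
    { s with nT := s.nT ++ [(PySem.List.pyGet? trueLabel ic.1).getD ""],
             nP := s.nP ++ [(PySem.List.pyGet? predLabel ic.1).getD ""] }
  else s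

def categorySplitLevel1 (trueLabel : List String) (predLabel : List String) : List String × List String × List String × List String × List String × List String × List String × List String × List String × List String × List String × List String × List String × List String :=
  let s := (PySem.List.enumerate trueLabel).foldl (stepA trueLabel predLabel)
            ⟨[], [], [], [], [], [], [], [], [], [], [], [], [], []⟩
  (s.rT, s.rP, s.sT, s.sP, s.dT, s.dP, s.vT, s.vP, s.oT, s.oP, s.uT, s.uP, s.nT, s.nP)

-- ===== PORT B =====
def bucketB (pairs : List (String × String)) (cat : String) : List String × List String :=
  ((pairs.filter (fun tp => tp.1 == cat)).map (fun tp => tp.1),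
   (pairs.filter (fun tp => tp.1 == cat)).map (fun tp => tp.2))

def categorySplitLevel1_alt (trueLabel : List String) (predLabel : List String) : List String × List String × List String × List String × List String × List String × List String × List String × List String × List String × List String × List String × List String × List String :=
  let pairs := trueLabel.zip predLabel
  let req := bucketB pairs "requirement"
  let sys := bucketB pairs "system"
  let dom := bucketB pairs "domain"
  let dev := bucketB pairs "development process"
  let doc := bucketB pairs "document organisation"
  let unc := bucketB pairs "uncertain"
  let non := bucketB pairs "non-information"
  (req.1, req.2, sys.1, sys.2, dom.1, dom.2, dev.1, dev.2, doc.1, doc.2, unc.1, unc.2, non.1, non.2)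

-- ===== PRECONDITION & SPEC =====
def pvCats : List String := ["requirement", "system", "domain", "development process", "document organisation", "uncertain", "non-information"]

-- Pre_ excludes exactly the inputs where A raises IndexError: a category label in trueLabel
-- at an index at or beyond len(predLabel).
def Pre_categorySplitLevel1 (trueLabel : List String) (predLabel : List String) : Prop :=
  ∀ p ∈ PySem.List.enumerate trueLabel 0, p.2 ∈ pvCats → p.1 < (predLabel.length : Int)
instance (trueLabel : List String) (predLabel : List String) : Decidable (Pre_categorySplitLevel1 trueLabel predLabel) := by unfold Pre_categorySplitLevel1; infer_instance

def pvWitness_categorySplitLevel1 : List String × List String :=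
  (["requirement", "foo", "system"], ["system", "requirement", "requirement"])

def pvD1 : DecidableEq (List String) := instDecidableEqList
def pvD2 : DecidableEq (List String × List String) := @instDecidableEqProd _ _ pvD1 pvD1
def pvD3 : DecidableEq (List String × List String × List String) := @instDecidableEqProd _ _ pvD1 pvD2
def pvD4 : DecidableEq (List String × List String × List String × List String) := @instDecidableEqProd _ _ pvD1 pvD3
def pvD5 : DecidableEq (List String × List String × List String × List String × List String) := @instDecidableEqProd _ _ pvD1 pvD4
def pvD6 : DecidableEq (List String × List String × List String × List String × List String × List String) := @instDecidableEqProd _ _ pvD1 pvD5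
def pvD7 : DecidableEq (List String × List String × List String × List String × List String × List String × List String) := @instDecidableEqProd _ _ pvD1 pvD6
def pvD8 : DecidableEq (List String × List String × List String × List String × List String × List String × List String × List String) := @instDecidableEqProd _ _ pvD1 pvD7
def pvD9 : DecidableEq (List String × List String × List String × List String × List String × List String × List String × List String × List String) := @instDecidableEqProd _ _ pvD1 pvD8
def pvD10 : DecidableEq (List String × List String × List String × List String × List String × List String × List String × List String × List String × List String) := @instDecidableEqProd _ _ pvD1 pvD9
def pvD11 : DecidableEq (List String × List String × List String × List String × List String × List String × List String × List String × List String × List String × List String) := @instDecidableEqProd _ _ pvD1 pvD10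
def pvD12 : DecidableEq (List String × List String × List String × List String × List String × List String × List String × List String × List String × List String × List String × List String) := @instDecidableEqProd _ _ pvD1 pvD11
def pvD13 : DecidableEq (List String × List String × List String × List String × List String × List String × List String × List String × List String × List String × List String × List String × List String) := @instDecidableEqProd _ _ pvD1 pvD12
def pvD14 : DecidableEq (List String × List String × List String × List String × List String × List String × List String × List String × List String × List String × List String × List String × List String × List String) := @instDecidableEqProd _ _ pvD1 pvD13

def Spec_categorySplitLevel1 (trueLabel : List String) (predLabel : List String) (out : List String × List String × List String × List String × List String × List String × List String × List String × List String × List String × List String × List String × List String × List String) : Prop := out = categorySplitLevel1_alt trueLabel predLabel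
instance (trueLabel : List String) (predLabel : List String) (out : List String × List String × List String × List String × List String × List String × List String × List String × List String × List String × List String × List String × List String × List String) : Decidable (Spec_categorySplitLevel1 trueLabel predLabel out) := by unfold Spec_categorySplitLevel1; exact pvD14 _ _

-- ===== CLAIM (what is proved, stated in full; the proofs are below) =====
def Claim_equal_categorySplitLevel1 : Prop := ∀ (trueLabel : List String) (predLabel : List String), Dom_categorySplitLevel1 trueLabel predLabel → Pre_categorySplitLevel1 trueLabel predLabel → Spec_categorySplitLevel1 trueLabel predLabel (categorySplitLevel1 trueLabel predLabel)

-- ===== LEMMAS AND PROOFS =====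

-- pure step over an aligned (true, pred) pair
def stepP (s : StA) (tp : String × String) : StA :=
  if tp.1 == "requirement" then
    { s with rT := s.rT ++ [tp.1], rP := s.rP ++ [tp.2] }
  else if tp.1 == "system" then
    { s with sT := s.sT ++ [tp.1], sP := s.sP ++ [tp.2] }
  else if tp.1 == "domain" then
    { s with dT := s.dT ++ [tp.1], dP := s.dP ++ [tp.2] }
  else if tp.1 == "development process" then
    { s with vT := s.vT ++ [tp.1], vP := s.vP ++ [tp.2] }
  else if tp.1 == "document organisation" then
    { s with oT := s.oT ++ [tp.1], oP := s.oP ++ [tp.2] }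
  else if tp.1 == "uncertain" then
    { s with uT := s.uT ++ [tp.1], uP := s.uP ++ [tp.2] }
  else if tp.1 == "non-information" then
    { s with nT := s.nT ++ [tp.1], nP := s.nP ++ [tp.2] }
  else s

theorem stepA_not_cat (TL pl : List String) (s : StA) (i : Int) (x : String)
    (hx : x ∉ pvCats) : stepA TL pl s (i, x) = s := by
  have h1 : (x == "requirement") = false := by
    simp [pvCats] at hx; simp [hx.1]
  have h2 : (x == "system") = false := by
    simp [pvCats] at hx; simp [hx.2.1]
  have h3 : (x == "domain") = false := by
    simp [pvCats] at hx; simp [hx.2.2.1]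
  have h4 : (x == "development process") = false := by
    simp [pvCats] at hx; simp [hx.2.2.2.1]
  have h5 : (x == "document organisation") = false := by
    simp [pvCats] at hx; simp [hx.2.2.2.2.1]
  have h6 : (x == "uncertain") = false := by
    simp [pvCats] at hx; simp [hx.2.2.2.2.2.1]
  have h7 : (x == "non-information") = false := by
    simp [pvCats] at hx; simp [hx.2.2.2.2.2.2]
  simp [stepA, h1, h2, h3, h4, h5, h6, h7]

theorem stepA_eq_stepP (TL pl : List String) (s : StA) (i : Int) (x p : String)
    (hT : PySem.List.pyGet? TL i = some x) (hP : PySem.List.pyGet? pl i = some p) :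
    stepA TL pl s (i, x) = stepP s (x, p) := by
  simp only [stepA, stepP, hT, hP, Option.getD_some]

theorem foldA_no_cat (TL pl : List String) (l : List (Int × String)) (s : StA)
    (h : ∀ q ∈ l, q.2 ∉ pvCats) :
    List.foldl (stepA TL pl) s l = s := by
  induction l generalizing s with
  | nil => rfl
  | cons q t ih =>
    rw [List.foldl_cons]
    have := stepA_not_cat TL pl s q.1 q.2 (h q (List.mem_cons_self ..))
    rw [show (q.1, q.2) = q from rfl] at this
    rw [this]
    exact ih s (fun r hr => h r (List.mem_cons_of_mem _ hr))

theorem foldA_eq_foldP (TL pl : List String) :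
    ∀ (tl : List String) (k : Nat), tl = TL.drop k →
    (∀ j : Nat, (h : j < tl.length) → tl[j] ∈ pvCats → k + j < pl.length) →
    ∀ s : StA,
    List.foldl (stepA TL pl) s (PySem.List.enumerate tl (k : Int)) =
      List.foldl stepP s (tl.zip (pl.drop k)) := by
  intro tl
  induction tl with
  | nil => intro k _ _ s; simp [PySem.List.enumerate_nil]
  | cons x xs ih =>
    intro k hdrop hpre s
    have hTLk : PySem.List.pyGet? TL (k : Int) = some x := by
      rw [PySem.List.pyGet?_natCast]
      have : (TL.drop k)[0]? = some x := by rw [← hdrop]; rfl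
      simpa [List.getElem?_drop] using this
    have hxs : xs = TL.drop (k + 1) := by
      have : (TL.drop k).drop 1 = TL.drop (k + 1) := by
        rw [List.drop_drop]
      rw [← this, ← hdrop]; rfl
    rw [PySem.List.enumerate_cons, List.foldl_cons]
    rcases hpl : pl.drop k with _ | ⟨p, ps⟩
    · -- predictions exhausted: no remaining label can be a category
      have hklen : pl.length ≤ k := by
        have := List.drop_eq_nil_iff.mp hpl; omega
      have hx : x ∉ pvCats := by
        intro hc
        have := hpre 0 (by simp) (by simpa using hc)
        omega
      rw [stepA_not_cat TL pl s (k : Int) x hx]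
      rw [List.zip_nil_right, List.foldl_nil]
      apply foldA_no_cat
      intro q hq
      rw [PySem.List.mem_enumerate_iff] at hq
      obtain ⟨j, hj, rfl⟩ := hq
      intro hc
      have := hpre (j + 1) (by simpa using Nat.succ_lt_succ hj) (by simpa using hc)
      omega
    · -- aligned pair available
      have hk : k < pl.length := by
        by_contra h
        have hnil : pl.drop k = [] := List.drop_eq_nil_iff.mpr (by omega)
        rw [hpl] at hnil; exact absurd hnil (by simp)
      have hplk : PySem.List.pyGet? pl (k : Int) = some p := by
        rw [PySem.List.pyGet?_natCast]
        have : (pl.drop k)[0]? = some p := by rw [hpl]; rfl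
        simpa [List.getElem?_drop] using this
      rw [stepA_eq_stepP TL pl s (k : Int) x p hTLk hplk]
      have hps : ps = pl.drop (k + 1) := by
        have : (pl.drop k).drop 1 = pl.drop (k + 1) := by rw [List.drop_drop]
        rw [← this, hpl]; rfl
      rw [List.zip_cons_cons, List.foldl_cons, hps]
      have := ih (k + 1) hxs (fun j hj hc => by
        have := hpre (j + 1) (by simpa using Nat.succ_lt_succ hj) (by simpa using hc)
        omega) (stepP s (x, p))
      simpa [Int.natCast_add] using this

theorem foldP_eq_filters (l : List (String × String)) (s : StA) :
    List.foldl stepP s l =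
      { rT := s.rT ++ (l.filter (fun tp => tp.1 == "requirement")).map (fun tp => tp.1),
        rP := s.rP ++ (l.filter (fun tp => tp.1 == "requirement")).map (fun tp => tp.2),
        sT := s.sT ++ (l.filter (fun tp => tp.1 == "system")).map (fun tp => tp.1),
        sP := s.sP ++ (l.filter (fun tp => tp.1 == "system")).map (fun tp => tp.2),
        dT := s.dT ++ (l.filter (fun tp => tp.1 == "domain")).map (fun tp => tp.1),
        dP := s.dP ++ (l.filter (fun tp => tp.1 == "domain")).map (fun tp => tp.2),
        vT := s.vT ++ (l.filter (fun tp => tp.1 == "development process")).map (fun tp => tp.1),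
        vP := s.vP ++ (l.filter (fun tp => tp.1 == "development process")).map (fun tp => tp.2),
        oT := s.oT ++ (l.filter (fun tp => tp.1 == "document organisation")).map (fun tp => tp.1),
        oP := s.oP ++ (l.filter (fun tp => tp.1 == "document organisation")).map (fun tp => tp.2),
        uT := s.uT ++ (l.filter (fun tp => tp.1 == "uncertain")).map (fun tp => tp.1),
        uP := s.uP ++ (l.filter (fun tp => tp.1 == "uncertain")).map (fun tp => tp.2),
        nT := s.nT ++ (l.filter (fun tp => tp.1 == "non-information")).map (fun tp => tp.1),
        nP := s.nP ++ (l.filter (fun tp => tp.1 == "non-information")).map (fun tp => tp.2) } := by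
  induction l generalizing s with
  | nil => simp
  | cons tp t ih =>
    obtain ⟨a, b⟩ := tp
    rw [List.foldl_cons, ih]
    by_cases h1 : a = "requirement"
    · simp [stepP, h1]
    by_cases h2 : a = "system"
    · simp [stepP, h2]
    by_cases h3 : a = "domain"
    · simp [stepP, h3]
    by_cases h4 : a = "development process"
    · simp [stepP, h4]
    by_cases h5 : a = "document organisation"
    · simp [stepP, h5]
    by_cases h6 : a = "uncertain"
    · simp [stepP, h6]
    by_cases h7 : a = "non-information"
    · simp [stepP, h7]
    · simp [stepP, h1, h2, h3, h4, h5, h6, h7]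

-- ===== VERDICT (by name: the statement is the Claim_ definition above) =====
theorem categorySplitLevel1_spec : Claim_equal_categorySplitLevel1 := by
  intro tl pl _ hpre
  unfold Spec_categorySplitLevel1
  have hfold := foldA_eq_foldP tl pl tl 0 (by simp)
    (fun j hj hc => by
      have := hpre ((j : Int), tl[j]) (by
        rw [PySem.List.mem_enumerate_iff]; exact ⟨j, hj, by simp⟩) hc
      have : (j : Int) < (pl.length : Int) := by simpa using this
      omega)
    ⟨[], [], [], [], [], [], [], [], [], [], [], [], [], []⟩
  simp only [Nat.cast_zero] at hfold
  simp only [categorySplitLevel1, categorySplitLevel1_alt]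
  rw [hfold, List.drop_zero, foldP_eq_filters]
  simp [bucketB]
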